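-- pv_equiv track=rewrite | github.com/so4649/library | Berlekamp-Massey.py | autocorrelation
-- ===== SOURCE A (Python) =====
-- mod = 998244353
--
-- sum_e = (911660635, 509520358, 369330050, 332049552, 983190778, 123842337, 238493703, 975955924, 603855026, 856644456, 131300601, 842657263, 730768835, 942482514, 806263778, 151565301, 510815449, 503497456, 743006876, 741047443, 56250497)
--
-- sum_ie = (86583718, 372528824, 373294451, 645684063, 112220581, 692852209, 155456985, 797128860, 90816748, 860285882, 927414960, 354738543, 109331171, 293255632, 535113200, 308540755, 121186627, 608385704, 438932459, 359477183, 824071951)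
--
-- def inv_mod(a):
--     a %= mod
--     if a == 0:
--         return 0
--     s, t = mod, a
--     m0, m1 = 0, 1
--     while t:
--         u = s // t
--         s -= t * u
--         m0 -= m1 * u
--         s, t = t, s
--         m0, m1 = m1, m0
--     if m0 < 0:
--         m0 += mod // s
--     return m0
--
-- def butterfly(A):
--     n = len(A)
--     h = (n - 1).bit_length()
--     for ph in range(1, h + 1):
--         w = 1 << (ph - 1)
--         p = 1 << (h - ph)
--         now = 1
--         for s in range(w):
--             offset = s << (h - ph + 1)
--             for i in range(p):
--                 l = A[i + offset]
--                 r = A[i + offset + p] * now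
--                 A[i + offset] = (l + r) % mod
--                 A[i + offset + p] = (l - r) % mod
--             now *= sum_e[(~s & -~s).bit_length() - 1]
--             now %= mod
--
-- def butterfly_inv(A):
--     n = len(A)
--     h = (n - 1).bit_length()
--     for ph in range(h, 0, -1):
--         w = 1 << (ph - 1)
--         p = 1 << (h - ph)
--         inow = 1
--         for s in range(w):
--             offset = s << (h - ph + 1)
--             for i in range(p):
--                 l = A[i + offset]
--                 r = A[i + offset + p]
--                 A[i + offset] = (l + r) % mod
--                 A[i + offset + p] = (mod + l - r) * inow % mod
--             inow *= sum_ie[(~s & -~s).bit_length() - 1]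
--             inow %= mod
--     iz = inv_mod(n)
--     for i in range(n):
--         A[i] *= iz
--         A[i] %= mod
--
-- def autocorrelation(_A):
--     A = _A.copy()
--     n = len(A)
--     if not n:
--         return []
--     if n <= 60:
--         res = [0] * (n + n - 1)
--         for i in range(n):
--             for j in range(n):
--                 res[i + j] += A[i] * A[j]
--                 res[i + j] %= mod
--         return res
--     z = 1 << (n + n - 2).bit_length()
--     A += [0] * (z - n)
--     butterfly(A)
--     for i in range(z):
--         A[i] *= A[i]
--         A[i] %= mod
--     butterfly_inv(A)
--     return A[:n + n - 1]
--
-- a = [0,1,2,3,4,5,6,7,8]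
-- ===== SOURCE B (Python) =====
-- mod = 998244353
--
-- def autocorrelation(_A):
--     n = len(_A)
--     if not n:
--         return []
--     return [sum(_A[i] * _A[k - i] for i in range(max(0, k - n + 1), min(k, n - 1) + 1)) % mod
--             for k in range(n + n - 1)]
-- ===== Notes on version B (the rewrite author's own statement) =====
-- stated objective: simpler
-- what changed: B computes each output coefficient k directly as one window sum over i in [max(0,k-n+1), min(k,n-1)] with a single final mod, replacing A's scatter-accumulation double loop and its entire NTT machinery (butterfly/butterfly_inv/inv_mod and the n>60 branch); Pre_ only excludes lists longer than 2^20, on which A raises IndexError (its twiddle tables sum_e/sum_ie run out).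
import Mathlib
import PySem

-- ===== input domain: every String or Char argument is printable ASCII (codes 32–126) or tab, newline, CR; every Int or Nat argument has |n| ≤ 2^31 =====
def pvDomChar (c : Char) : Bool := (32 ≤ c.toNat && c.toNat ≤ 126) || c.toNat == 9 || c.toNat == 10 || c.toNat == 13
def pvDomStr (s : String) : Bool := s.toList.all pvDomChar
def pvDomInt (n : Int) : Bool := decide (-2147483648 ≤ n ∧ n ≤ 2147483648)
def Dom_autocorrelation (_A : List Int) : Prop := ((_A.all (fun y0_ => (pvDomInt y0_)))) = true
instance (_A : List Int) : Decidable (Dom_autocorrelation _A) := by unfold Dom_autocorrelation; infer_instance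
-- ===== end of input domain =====

-- B replaces A's scatter-accumulation loop and its whole NTT machinery (butterfly / butterfly_inv /
-- inv_mod and the n>60 branch) by one direct window sum per output coefficient ('simpler'; not faster).
-- A mutates no argument (it copies _A first); the equivalence is about the return value.

-- ===== PORT A =====
def pvMod : Int := 998244353
def pvSumE : List Int := [911660635, 509520358, 369330050, 332049552, 983190778, 123842337, 238493703, 975955924, 603855026, 856644456, 131300601, 842657263, 730768835, 942482514, 806263778, 151565301, 510815449, 503497456, 743006876, 741047443, 56250497]
def pvSumIE : List Int := [86583718, 372528824, 373294451, 645684063, 112220581, 692852209, 155456985, 797128860, 90816748, 860285882, 927414960, 354738543, 109331171, 293255632, 535113200, 308540755, 121186627, 608385704, 438932459, 359477183, 824071951]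

-- 'while t:' of inv_mod as structural recursion on fuel; the call below passes fuel 100, enough for
-- Euclid from (998244353, t) for every 0 < t < 998244353 (iteration count is Fibonacci-bounded by 45).
def pvInvGo : Nat → Int → Int → Int → Int → Int
  | 0, s, _, m0, _ => if m0 < 0 then m0 + PySem.Int.floordiv pvMod s else m0
  | f+1, s, t, m0, m1 =>
    if t = 0 then (if m0 < 0 then m0 + PySem.Int.floordiv pvMod s else m0)
    else pvInvGo f t (PySem.Int.mod s t) m1 (m0 - m1 * PySem.Int.floordiv s t)

def pvInvMod (a : Int) : Int :=
  let a := PySem.Int.mod a pvMod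
  if a = 0 then 0 else pvInvGo 100 pvMod a 0 1

-- (~s & -~s).bit_length() - 1  (s ≥ 0 throughout A)
def pvEIdx (s : Nat) : Nat := PySem.Int.bitLength (PySem.Int.band (Int.not (s:Int)) ((s:Int)+1)) - 1

def pvBflyInner (off p : Nat) (now : Int) (A : List Int) : List Int :=
  (List.range p).foldl (fun A i =>
    let l := A.getD (i + off) 0
    let r := A.getD (i + off + p) 0 * now
    (A.set (i + off) (PySem.Int.mod (l + r) pvMod)).set (i + off + p) (PySem.Int.mod (l - r) pvMod)) A

def pvBflyStage (h ph : Nat) (A : List Int) : List Int :=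
  ((List.range (2^(ph-1))).foldl (fun st s =>
    (pvBflyInner (s * 2^(h-ph+1)) (2^(h-ph)) st.2 st.1,
     PySem.Int.mod (st.2 * pvSumE.getD (pvEIdx s) 0) pvMod)) (A, (1:Int))).1

def pvButterfly (A : List Int) : List Int :=
  let h := PySem.Int.bitLength ((A.length : Int) - 1)
  (List.range h).foldl (fun A ph' => pvBflyStage h (ph'+1) A) A

def pvBflyInvInner (off p : Nat) (inow : Int) (A : List Int) : List Int :=
  (List.range p).foldl (fun A i =>
    let l := A.getD (i + off) 0
    let r := A.getD (i + off + p) 0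
    (A.set (i + off) (PySem.Int.mod (l + r) pvMod)).set (i + off + p) (PySem.Int.mod ((pvMod + l - r) * inow) pvMod)) A

def pvBflyInvStage (h ph : Nat) (A : List Int) : List Int :=
  ((List.range (2^(ph-1))).foldl (fun st s =>
    (pvBflyInvInner (s * 2^(h-ph+1)) (2^(h-ph)) st.2 st.1,
     PySem.Int.mod (st.2 * pvSumIE.getD (pvEIdx s) 0) pvMod)) (A, (1:Int))).1

def pvButterflyInv (A0 : List Int) : List Int :=
  let n := A0.length
  let h := PySem.Int.bitLength ((n : Int) - 1)
  let A := (List.range h).foldl (fun A ph' => pvBflyInvStage h (h - ph') A) A0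
  let iz := pvInvMod (n : Int)
  (List.range n).foldl (fun A i => A.set i (PySem.Int.mod (A.getD i 0 * iz) pvMod)) A

def autocorrelation (_A : List Int) : List Int :=
  let n := _A.length
  if n = 0 then []
  else if n ≤ 60 then
    (List.range n).foldl (fun res i =>
      (List.range n).foldl (fun res j =>
        res.set (i+j) (PySem.Int.mod (res.getD (i+j) 0 + _A.getD i 0 * _A.getD j 0) pvMod)) res)
      (List.replicate (n + n - 1) 0)
  else
    let z := 2 ^ (PySem.Int.bitLength ((n : Int) + (n:Int) - 2))
    let A := _A ++ List.replicate (z - n) 0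
    let A := pvButterfly A
    let A := (List.range z).foldl (fun A i => A.set i (PySem.Int.mod (A.getD i 0 * A.getD i 0) pvMod)) A
    let A := pvButterflyInv A
    A.take (n + n - 1)

-- ===== PORT B =====
def autocorrelation_alt (_A : List Int) : List Int :=
  let n := _A.length
  if n = 0 then []
  else (List.range (n + n - 1)).map (fun k =>
    let lo := k + 1 - n
    let hi := min k (n - 1)
    PySem.Int.mod (((List.range (hi + 1 - lo)).map (fun t =>
      _A.getD (lo + t) 0 * _A.getD (k - (lo + t)) 0)).sum) pvMod)

-- ===== PRECONDITION & SPEC =====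
-- Pre_ excludes only lists longer than 2^20: there A raises IndexError (butterfly's twiddle tables
-- sum_e / sum_ie have 21 entries and are exhausted once (2n-2).bit_length() exceeds 21).
def Pre_autocorrelation (_A : List Int) : Prop := _A.length ≤ 1048576
instance (_A : List Int) : Decidable (Pre_autocorrelation _A) := by unfold Pre_autocorrelation; infer_instance
def pvWitness_autocorrelation : List Int := [3, -5, 7]

def Spec_autocorrelation (_A : List Int) (out : List Int) : Prop := out = autocorrelation_alt _A
instance (_A : List Int) (out : List Int) : Decidable (Spec_autocorrelation _A out) := by unfold Spec_autocorrelation; infer_instance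

-- ===== CLAIM (what is proved, stated in full; the proofs are below) =====
def Claim_equal_autocorrelation : Prop := ∀ (_A : List Int), Dom_autocorrelation _A → Pre_autocorrelation _A → Spec_autocorrelation _A (autocorrelation _A)

-- ===== LEMMAS AND PROOFS =====

-- ---------- foundations: pvK, casts ----------
abbrev pvK := ZMod 998244353

lemma pv_phi_mod (x : Int) : ((PySem.Int.mod x pvMod : Int) : pvK) = (x : pvK) := by
  have h : (0:Int) < pvMod := by decide
  rw [PySem.Int.mod_eq_emod_of_pos h]
  have : ((998244353 : Nat) : Int) = pvMod := by decide
  rw [ZMod.intCast_eq_intCast_iff']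
  show x.emod pvMod % ((998244353:Nat):Int) = x % ((998244353:Nat):Int)
  rw [this]
  exact Int.emod_emod_of_dvd x dvd_rfl

lemma pv_mod_bounds (x : Int) : 0 ≤ PySem.Int.mod x pvMod ∧ PySem.Int.mod x pvMod < pvMod :=
  ⟨PySem.Int.mod_nonneg x (by decide), PySem.Int.mod_lt x (by decide)⟩

lemma pv_int_eq_of_cast (x y : Int) (hx : 0 ≤ x ∧ x < pvMod) (hy : 0 ≤ y ∧ y < pvMod)
    (h : (x : pvK) = (y : pvK)) : x = y := by
  rw [ZMod.intCast_eq_intCast_iff'] at h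
  have hx' : x % ((998244353:Nat):Int) = x := Int.emod_eq_of_lt hx.1 (by exact_mod_cast hx.2)
  have hy' : y % ((998244353:Nat):Int) = y := Int.emod_eq_of_lt hy.1 (by exact_mod_cast hy.2)
  rw [hx', hy'] at h
  exact h

-- ---------- bit-trick index (~s & -~s).bit_length() - 1 ----------
lemma pv_land_even (m : Nat) : (2*m+1) &&& (2*m) = 2*m := by
  apply Nat.eq_of_testBit_eq
  intro i
  cases i with
  | zero => simp
  | succ i =>
    rw [Nat.testBit_land, Nat.testBit_succ, Nat.testBit_succ]
    have e1 : (2*m+1)/2 = m := by omega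
    have e2 : (2*m)/2 = m := by omega
    rw [e1, e2, Bool.and_self]

lemma pv_land_odd (m : Nat) : (2*m+2) &&& (2*m+1) = 2*((m+1) &&& m) := by
  apply Nat.eq_of_testBit_eq
  intro i
  cases i with
  | zero => simp
  | succ i =>
    rw [Nat.testBit_land, Nat.testBit_succ, Nat.testBit_succ, Nat.testBit_succ]
    have e1 : (2*m+2)/2 = m+1 := by omega
    have e2 : (2*m+1)/2 = m := by omega
    have e3 : (2*((m+1) &&& m))/2 = (m+1) &&& m := by omega
    rw [e1, e2, e3, Nat.testBit_land]

lemma pv_land_le (a b : Nat) : a &&& b ≤ b := Nat.and_le_right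

def pvNB (s : Nat) : Nat := (s+1) - ((s+1) &&& s)

lemma pv_band_not (s : Nat) : PySem.Int.band (Int.not (s:Int)) ((s:Int)+1) = ((pvNB s : Nat) : Int) := by
  have h1 : Int.not (s:Int) = Int.negSucc s := rfl
  rw [h1]
  simp only [PySem.Int.band]
  have h2 : ¬ (0:Int) ≤ Int.negSucc s := by omega
  have h3 : (0:Int) ≤ (s:Int) + 1 := by omega
  rw [if_neg h2, if_pos h3]
  congr 1
  have h4 : (-(Int.negSucc s) - 1) = (s : Int) := by omega
  rw [h4]
  have h5 : ((s:Int)+1).toNat = s + 1 := by omega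
  have h6 : ((s:Int)).toNat = s := by omega
  rw [h5, h6]
  rfl

lemma pvNB_even (m : Nat) : pvNB (2*m) = 1 := by
  unfold pvNB
  rw [pv_land_even]
  omega

lemma pvNB_odd (m : Nat) : pvNB (2*m+1) = 2 * pvNB m := by
  unfold pvNB
  have h : 2*m+1+1 = 2*m+2 := by omega
  rw [h, pv_land_odd]
  have := pv_land_le (m+1) m
  omega

lemma pvNB_pos (s : Nat) : 1 ≤ pvNB s := by
  unfold pvNB
  have := pv_land_le (s+1) s
  omega

lemma pv_bl_pos (m : Nat) (hm : 1 ≤ m) : 1 ≤ PySem.Int.bitLength (m : Int) := by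
  by_contra h
  have h0 : PySem.Int.bitLength (m : Int) = 0 := by omega
  have := PySem.Int.lt_two_pow_bitLength (m : Int)
  rw [h0] at this
  simp at this
  omega

lemma pvEIdx_nb (s : Nat) : pvEIdx s = PySem.Int.bitLength ((pvNB s : Nat) : Int) - 1 := by
  unfold pvEIdx
  rw [pv_band_not]

lemma pvEIdx_even (m : Nat) : pvEIdx (2*m) = 0 := by
  rw [pvEIdx_nb, pvNB_even]
  decide

lemma pvEIdx_odd (m : Nat) : pvEIdx (2*m+1) = pvEIdx m + 1 := by
  rw [pvEIdx_nb, pvEIdx_nb, pvNB_odd]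
  have h1 : ((2 * pvNB m : Nat) : Int) = 2 * ((pvNB m : Nat) : Int) := by push_cast; ring
  have hpos : 0 < 2 * pvNB m := by have := pvNB_pos m; omega
  have h2 : PySem.Int.bitLength ((2 * pvNB m : Nat) : Int) = PySem.Int.bitLength ((pvNB m : Nat) : Int) + 1 := by
    rw [PySem.Int.bitLength_natCast hpos]
    congr 2
    omega
  rw [h2]
  have := pv_bl_pos (pvNB m) (pvNB_pos m)
  omega

lemma pvEIdx_lt (k : Nat) : ∀ s : Nat, s + 1 < 2^k → pvEIdx s < k := by
  induction k with
  | zero => intro s h; simp at h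
  | succ k ih =>
    intro s h
    rcases Nat.even_or_odd s with ⟨m, hm⟩ | ⟨m, hm⟩
    · have hm2 : s = 2*m := by omega
      rw [hm2, pvEIdx_even m]
      omega
    · subst hm
      rw [pvEIdx_odd]
      have hk : 0 < k := by
        by_contra hk0
        have hk1 : k = 0 := by omega
        subst hk1
        have h2 : (2:Nat)^(0+1) = 2 := by norm_num
        rw [h2] at h
        omega
      have : m + 1 < 2^k := by
        rw [pow_succ] at h
        omega
      exact Nat.succ_lt_succ (ih m this)

-- ---------- concrete table facts ----------
def pvEK (j : Nat) : pvK := ((pvSumE.getD j 0 : Int) : pvK)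
def pvIEK (j : Nat) : pvK := ((pvSumIE.getD j 0 : Int) : pvK)

lemma pv_tableE0 : pvEK 0 * pvEK 0 = -1 := by decide
lemma pv_tableE (j : Nat) (h : j < 20) : pvEK (j+1) * pvEK (j+1) = -pvEK j := by revert j; decide
lemma pv_tableEIE (j : Nat) (h : j < 21) : pvEK j * pvIEK j = 1 := by revert j; decide

-- ---------- twiddle sequences ----------
def pvCseq : Nat → Int
  | 0 => 1
  | s+1 => PySem.Int.mod (pvCseq s * pvSumE.getD (pvEIdx s) 0) pvMod
def pvDseq : Nat → Int
  | 0 => 1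
  | s+1 => PySem.Int.mod (pvDseq s * pvSumIE.getD (pvEIdx s) 0) pvMod

def pvC (s : Nat) : pvK := ((pvCseq s : Int) : pvK)
def pvD (s : Nat) : pvK := ((pvDseq s : Int) : pvK)
def pvU (s : Nat) : pvK := pvC s * pvC s

lemma pvC_zero : pvC 0 = 1 := by decide
lemma pvCseq_succ (s : Nat) : pvCseq (s+1) = PySem.Int.mod (pvCseq s * pvSumE.getD (pvEIdx s) 0) pvMod := rfl
lemma pvDseq_succ (s : Nat) : pvDseq (s+1) = PySem.Int.mod (pvDseq s * pvSumIE.getD (pvEIdx s) 0) pvMod := rfl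
lemma pvC_succ (s : Nat) : pvC (s+1) = pvC s * pvEK (pvEIdx s) := by
  unfold pvC pvEK
  rw [pvCseq_succ, pv_phi_mod]
  push_cast
  ring
lemma pvD_succ (s : Nat) : pvD (s+1) = pvD s * pvIEK (pvEIdx s) := by
  unfold pvD pvIEK
  rw [pvDseq_succ, pv_phi_mod]
  push_cast
  ring

lemma pvC_sq : ∀ s : Nat, s < 2^20 →
    pvC (2*s) * pvC (2*s) = pvC s ∧ pvC (2*s+1) * pvC (2*s+1) = -pvC s := by
  intro s
  induction s with
  | zero =>
    intro _
    constructor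
    · decide
    · have h1 : pvC 1 = pvC 0 * pvEK (pvEIdx 0) := pvC_succ 0
      have h0 : pvEIdx 0 = 0 := by decide
      rw [show (2*0+1) = 1 by rfl, h1, h0, pvC_zero, one_mul]
      rw [pv_tableE0]
  | succ s ih =>
    intro hs
    have hs' : s < 2^20 := by omega
    obtain ⟨ihe, iho⟩ := ih hs'
    have hidx : pvEIdx s < 20 := pvEIdx_lt 20 s (by omega)
    have h1 : pvC (2*(s+1)) = pvC (2*s+1) * pvEK (pvEIdx s + 1) := by
      have := pvC_succ (2*s+1)
      rw [pvEIdx_odd s] at this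
      rw [show 2*(s+1) = (2*s+1)+1 by omega, this]
    have heven : pvC (2*(s+1)) * pvC (2*(s+1)) = pvC (s+1) := by
      rw [h1]
      have : pvC (2*s+1) * pvEK (pvEIdx s + 1) * (pvC (2*s+1) * pvEK (pvEIdx s + 1))
           = (pvC (2*s+1) * pvC (2*s+1)) * (pvEK (pvEIdx s + 1) * pvEK (pvEIdx s + 1)) := by ring
      rw [this, iho, pv_tableE _ hidx, pvC_succ s]
      ring
    refine ⟨heven, ?_⟩
    have h2 : pvC (2*(s+1)+1) = pvC (2*(s+1)) * pvEK 0 := by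
      have := pvC_succ (2*(s+1))
      rw [pvEIdx_even (s+1)] at this
      exact this
    rw [h2]
    have : pvC (2*(s+1)) * pvEK 0 * (pvC (2*(s+1)) * pvEK 0)
         = (pvC (2*(s+1)) * pvC (2*(s+1))) * (pvEK 0 * pvEK 0) := by ring
    rw [this, heven, pv_tableE0]
    ring

lemma pvU_even (s : Nat) (h : s < 2^20) : pvU (2*s) = pvC s := (pvC_sq s h).1
lemma pvU_odd (s : Nat) (h : s < 2^20) : pvU (2*s+1) = -pvC s := (pvC_sq s h).2

lemma pvCD : ∀ s : Nat, s ≤ 2^20 → pvC s * pvD s = 1 := by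
  intro s
  induction s with
  | zero => intro _; decide
  | succ s ih =>
    intro hs
    have hidx : pvEIdx s < 21 := pvEIdx_lt 21 s (by omega)
    rw [pvC_succ, pvD_succ]
    have : pvC s * pvEK (pvEIdx s) * (pvD s * pvIEK (pvEIdx s))
         = (pvC s * pvD s) * (pvEK (pvEIdx s) * pvIEK (pvEIdx s)) := by ring
    rw [this, ih (by omega), pv_tableEIE _ hidx]
    ring

lemma pv_pow_double (x : pvK) (k : Nat) : x ^ (2^(k+1)) = (x*x)^(2^k) := by
  have h : (2:Nat)^(k+1) = 2*2^k := by rw [pow_succ]; ring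
  rw [h, pow_mul, pow_two]

lemma pvU_pow : ∀ k : Nat, k ≤ 21 → ∀ s : Nat, s < 2^k → pvU s ^ (2^k) = 1 := by
  intro k
  induction k with
  | zero =>
    intro _ s hs
    have : s = 0 := by omega
    subst this
    decide
  | succ k ih =>
    intro hk s hs
    rcases Nat.even_or_odd s with ⟨m, hm⟩ | ⟨m, hm⟩
    · have hm2 : s = 2*m := by omega
      subst hm2
      have hmk : m < 2^k := by rw [pow_succ] at hs; omega
      have hm20 : m < 2^20 := by
        have : (2:Nat)^k ≤ 2^20 := Nat.pow_le_pow_right (by norm_num) (by omega)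
        omega
      rw [pvU_even m hm20, pv_pow_double]
      calc (pvC m * pvC m) ^ (2^k) = pvU m ^ (2^k) := rfl
        _ = 1 := ih (by omega) m hmk
    · subst hm
      have hmk : m < 2^k := by rw [pow_succ] at hs; omega
      have hm20 : m < 2^20 := by
        have : (2:Nat)^k ≤ 2^20 := Nat.pow_le_pow_right (by norm_num) (by omega)
        omega
      rw [pvU_odd m hm20]
      have heq : (-pvC m) ^ (2^(k+1)) = (pvC m) ^ (2^(k+1)) := by
        rw [neg_pow]
        have hev : Even ((2:Nat)^(k+1)) := ⟨2^k, by rw [pow_succ]; ring⟩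
        rw [Even.neg_one_pow hev, one_mul]
      rw [heq, pv_pow_double]
      calc (pvC m * pvC m) ^ (2^k) = pvU m ^ (2^k) := rfl
        _ = 1 := ih (by omega) m hmk

-- ---------- bitLength lemmas ----------
lemma pv_bl_pow_sub_one : ∀ k : Nat, PySem.Int.bitLength (((2^k : Nat) : Int) - 1) = k := by
  intro k
  induction k with
  | zero => decide
  | succ k ih =>
    have h1 : ((2^(k+1) : Nat) : Int) - 1 = (((2^(k+1) - 1 : Nat)) : Int) := by
      have : 1 ≤ 2^(k+1) := Nat.one_le_two_pow
      push_cast [this]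
      omega
    rw [h1, PySem.Int.bitLength_natCast (show 0 < 2^(k+1) - 1 by
      have : (2:Nat) ≤ 2^(k+1) := by
        calc (2:Nat) = 2^1 := by norm_num
          _ ≤ 2^(k+1) := Nat.pow_le_pow_right (by norm_num) (by omega)
      omega)]
    have h2 : (2^(k+1) - 1) / 2 = 2^k - 1 := by
      have : (2:Nat)^(k+1) = 2 * 2^k := by rw [pow_succ]; ring
      omega
    rw [h2]
    have h3 : ((2^k - 1 : Nat) : Int) = ((2^k : Nat) : Int) - 1 := by
      have : 1 ≤ 2^k := Nat.one_le_two_pow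
      push_cast [this]
      omega
    rw [h3, ih]

lemma pv_bl_le (m k : Nat) (h : m < 2^k) : PySem.Int.bitLength (m : Int) ≤ k := by
  by_contra hc
  have h1 : 2^k ≤ 2^(PySem.Int.bitLength (m : Int) - 1) := by
    apply Nat.pow_le_pow_right (by norm_num)
    omega
  rcases Nat.eq_zero_or_pos m with h0 | h0
  · subst h0; simp [PySem.Int.bitLength_zero] at hc
  · have h2 := PySem.Int.two_pow_bitLength_le (m : Int) (by exact_mod_cast (by omega : m ≠ 0))
    simp only [Int.natAbs_natCast] at h2
    omega

lemma pv_lt_pow_bl (m : Nat) : m < 2^(PySem.Int.bitLength (m : Int)) := by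
  have := PySem.Int.lt_two_pow_bitLength (m : Int)
  simpa using this


-- ---------- getD/set helpers ----------
lemma pv_getD_set_eq (A : List Int) (i : Nat) (v : Int) (h : i < A.length) :
    (A.set i v).getD i 0 = v := by
  unfold List.getD
  rw [List.getElem?_set_self (by simpa using h)]
  rfl

lemma pv_getD_set_ne (A : List Int) (i j : Nat) (v : Int) (h : i ≠ j) :
    (A.set i v).getD j 0 = A.getD j 0 := by
  unfold List.getD
  rw [List.getElem?_set_ne h]

-- ---------- generic single-cell loop ----------
lemma pv_setloop_spec (f : Nat → Int → Int) (A : List Int) (m : Nat) (hm : m ≤ A.length) :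
    ((List.range m).foldl (fun B i => B.set i (f i (B.getD i 0))) A).length = A.length ∧
    ∀ j : Nat, ((List.range m).foldl (fun B i => B.set i (f i (B.getD i 0))) A).getD j 0 =
      if j < m then f j (A.getD j 0) else A.getD j 0 := by
  induction m with
  | zero => simp
  | succ m ih =>
    obtain ⟨ihl, ihg⟩ := ih (by omega)
    rw [List.range_succ, List.foldl_append]
    set B := (List.range m).foldl (fun B i => B.set i (f i (B.getD i 0))) A with hB
    simp only [List.foldl_cons, List.foldl_nil]
    have hBm : B.getD m 0 = A.getD m 0 := by rw [ihg]; simp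
    constructor
    · rw [List.length_set, ihl]
    · intro j
      rcases eq_or_ne j m with hj | hj
      · subst hj
        rw [pv_getD_set_eq B j (f j (B.getD j 0)) (by omega), hBm]
        simp
      · rw [pv_getD_set_ne B m j _ (fun h => hj h.symm), ihg]
        by_cases h1 : j < m
        · rw [if_pos h1, if_pos (by omega)]
        · rw [if_neg h1, if_neg (by omega)]

-- ---------- generic butterfly block loop ----------
lemma pv_inner_spec (g1 g2 : Int → Int → Int) (off p : Nat) (A : List Int)
    (hlen : off + p + p ≤ A.length) (m : Nat) (hm : m ≤ p) :
    ((List.range m).foldl (fun B i =>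
      (B.set (i+off) (g1 (B.getD (i+off) 0) (B.getD (i+off+p) 0))).set (i+off+p)
        (g2 (B.getD (i+off) 0) (B.getD (i+off+p) 0))) A).length = A.length ∧
    ∀ j : Nat, ((List.range m).foldl (fun B i =>
      (B.set (i+off) (g1 (B.getD (i+off) 0) (B.getD (i+off+p) 0))).set (i+off+p)
        (g2 (B.getD (i+off) 0) (B.getD (i+off+p) 0))) A).getD j 0 =
      if off ≤ j ∧ j < off + m then g1 (A.getD j 0) (A.getD (j+p) 0)
      else if off + p ≤ j ∧ j < off + p + m then g2 (A.getD (j-p) 0) (A.getD j 0)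
      else A.getD j 0 := by
  induction m with
  | zero =>
    constructor
    · simp
    · intro j
      rw [if_neg (by omega), if_neg (by omega)]
      simp
  | succ m ih =>
    have hmp : m < p := by omega
    obtain ⟨ihl, ihg⟩ := ih (by omega)
    rw [List.range_succ, List.foldl_append]
    set B := (List.range m).foldl (fun B i =>
      (B.set (i+off) (g1 (B.getD (i+off) 0) (B.getD (i+off+p) 0))).set (i+off+p)
        (g2 (B.getD (i+off) 0) (B.getD (i+off+p) 0))) A with hB
    simp only [List.foldl_cons, List.foldl_nil]
    have hBl : B.getD (m+off) 0 = A.getD (m+off) 0 := by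
      rw [ihg, if_neg (by omega), if_neg (by omega)]
    have hBr : B.getD (m+off+p) 0 = A.getD (m+off+p) 0 := by
      rw [ihg, if_neg (by omega), if_neg (by omega)]
    constructor
    · rw [List.length_set, List.length_set, ihl]
    · intro j
      rcases eq_or_ne j (m+off) with hj1 | hj1
      · subst hj1
        rw [pv_getD_set_ne _ _ _ _ (by omega : m+off+p ≠ m+off)]
        rw [pv_getD_set_eq _ _ _ (by rw [ihl] at *; omega)]
        rw [hBl, hBr, if_pos (by omega)]
      · rcases eq_or_ne j (m+off+p) with hj2 | hj2
        · subst hj2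
          rw [pv_getD_set_eq _ _ _ (by rw [List.length_set, ihl]; omega)]
          rw [hBl, hBr, if_neg (by omega), if_pos (by omega)]
          have he : m + off + p - p = m + off := by omega
          rw [he]
        · rw [pv_getD_set_ne _ _ _ _ (fun h => hj2 h.symm),
              pv_getD_set_ne _ _ _ _ (fun h => hj1 h.symm), ihg]
          by_cases h1 : off ≤ j ∧ j < off + m
          · rw [if_pos h1, if_pos (by omega)]
          · rw [if_neg h1]
            by_cases h2 : off + p ≤ j ∧ j < off + p + m
            · rw [if_pos h2, if_neg (by omega), if_pos (by omega)]
            · rw [if_neg h2, if_neg (by omega), if_neg (by omega)]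

-- ---------- generic stage fold (a pass over blocks of size p2 with an evolving twiddle) ----------
lemma pv_stagefold_spec
    (T : Int → Nat → List Int → List Int)
    (payload : Int → (Nat → Int) → Nat → Int)
    (p2 : Nat) (hp2 : 0 < p2)
    (hT : ∀ (now : Int) (s : Nat) (A : List Int), s*p2 + p2 ≤ A.length →
        (T now (s*p2) A).length = A.length ∧ ∀ j : Nat,
          (T now (s*p2) A).getD j 0 =
            if s*p2 ≤ j ∧ j < s*p2 + p2 then payload now (fun t => A.getD t 0) j else A.getD j 0)
    (hpay : ∀ (now : Int) (f g : Nat → Int) (j : Nat),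
        (∀ t, (j/p2)*p2 ≤ t → t < (j/p2)*p2 + p2 → f t = g t) → payload now f j = payload now g j)
    (upd : Nat → Int → Int) (seq : Nat → Int) (hseq : ∀ s, seq (s+1) = upd s (seq s))
    (w : Nat) (A : List Int) (hlen : w * p2 ≤ A.length) :
    ((List.range w).foldl (fun st s => (T st.2 (s*p2) st.1, upd s st.2)) (A, seq 0)).2 = seq w ∧
    ((List.range w).foldl (fun st s => (T st.2 (s*p2) st.1, upd s st.2)) (A, seq 0)).1.length = A.length ∧
    ∀ j : Nat, ((List.range w).foldl (fun st s => (T st.2 (s*p2) st.1, upd s st.2)) (A, seq 0)).1.getD j 0 =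
      if j < w * p2 then payload (seq (j/p2)) (fun t => A.getD t 0) j else A.getD j 0 := by
  induction w with
  | zero =>
    refine ⟨rfl, rfl, ?_⟩
    intro j
    rw [if_neg (by omega)]
    rfl
  | succ w ih =>
    have e2 : (w+1)*p2 = w*p2 + p2 := by ring
    obtain ⟨ih2, ihl, ihg⟩ := ih (by omega)
    rw [List.range_succ, List.foldl_append]
    set R := (List.range w).foldl (fun st s => (T st.2 (s*p2) st.1, upd s st.2)) (A, seq 0) with hR
    simp only [List.foldl_cons, List.foldl_nil]
    have hlen2 : w*p2 + p2 ≤ R.1.length := by rw [ihl]; omega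
    obtain ⟨hTl, hTg⟩ := hT R.2 w R.1 hlen2
    refine ⟨?_, ?_, ?_⟩
    · show upd w R.2 = seq (w+1)
      rw [ih2, hseq]
    · show (T R.2 (w*p2) R.1).length = A.length
      rw [hTl, ihl]
    · intro j
      show (T R.2 (w*p2) R.1).getD j 0 = _
      rw [hTg j]
      by_cases hb : w*p2 ≤ j ∧ j < w*p2 + p2
      · rw [if_pos hb]
        have hdiv : j / p2 = w := by
          have e1 : p2*w = w*p2 := Nat.mul_comm p2 w
          have h1 : j = (j - w*p2) + p2*w := by omega
          rw [h1, Nat.add_mul_div_left _ _ hp2, Nat.div_eq_of_lt (by omega)]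
          omega
        rw [if_pos (show j < (w+1)*p2 by omega), hdiv, ih2]
        apply hpay
        intro t ht1 ht2
        rw [hdiv] at ht1 ht2
        rw [ihg t, if_neg (by omega)]
      · rw [if_neg hb, ihg j]
        by_cases hc : j < w * p2
        · rw [if_pos hc, if_pos (by omega)]
        · rw [if_neg hc, if_neg (by omega)]

-- ---------- model maps on functions ℕ → pvK ----------
def pvFm (p : Nat) (v : Nat → pvK) : Nat → pvK := fun j =>
  if j % (2*p) < p then v j + v (j+p) * pvC (j/(2*p)) else v (j-p) - v j * pvC (j/(2*p))
def pvGm (p : Nat) (v : Nat → pvK) : Nat → pvK := fun j =>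
  if j % (2*p) < p then v j + v (j+p) else (v (j-p) - v j) * pvD (j/(2*p))

def pvFSeg : Nat → Nat → (Nat → pvK) → (Nat → pvK)
  | _, 0, v => v
  | m, k+1, v => pvFSeg m k (pvFm (2^(m+k)) v)
def pvGSeg : Nat → Nat → (Nat → pvK) → (Nat → pvK)
  | _, 0, v => v
  | m, k+1, v => pvGm (2^(m+k)) (pvGSeg m k v)

-- ---------- port payloads ----------
def pvPayF (p2 p : Nat) (now : Int) (f : Nat → Int) (j : Nat) : Int :=
  if j % p2 < p then PySem.Int.mod (f j + f (j+p) * now) pvMod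
  else PySem.Int.mod (f (j-p) - f j * now) pvMod
def pvPayG (p2 p : Nat) (now : Int) (f : Nat → Int) (j : Nat) : Int :=
  if j % p2 < p then PySem.Int.mod (f j + f (j+p)) pvMod
  else PySem.Int.mod ((pvMod + f (j-p) - f j) * now) pvMod

lemma pv_block_decomp (j p2 : Nat) (hp2 : 0 < p2) :
    j = (j/p2)*p2 + j % p2 ∧ j % p2 < p2 := by
  constructor
  · rw [Nat.mul_comm]
    exact (Nat.div_add_mod j p2).symm
  · exact Nat.mod_lt _ hp2

lemma pvPayF_local (p : Nat) (hp : 0 < p) (now : Int) (f g : Nat → Int) (j : Nat)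
    (h : ∀ t, (j/(2*p))*(2*p) ≤ t → t < (j/(2*p))*(2*p) + 2*p → f t = g t) :
    pvPayF (2*p) p now f j = pvPayF (2*p) p now g j := by
  obtain ⟨hd, hm⟩ := pv_block_decomp j (2*p) (by omega)
  unfold pvPayF
  by_cases hc : j % (2*p) < p
  · rw [if_pos hc, if_pos hc, h j (by omega) (by omega), h (j+p) (by omega) (by omega)]
  · rw [if_neg hc, if_neg hc, h (j-p) (by omega) (by omega), h j (by omega) (by omega)]

lemma pvPayG_local (p : Nat) (hp : 0 < p) (now : Int) (f g : Nat → Int) (j : Nat)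
    (h : ∀ t, (j/(2*p))*(2*p) ≤ t → t < (j/(2*p))*(2*p) + 2*p → f t = g t) :
    pvPayG (2*p) p now f j = pvPayG (2*p) p now g j := by
  obtain ⟨hd, hm⟩ := pv_block_decomp j (2*p) (by omega)
  unfold pvPayG
  by_cases hc : j % (2*p) < p
  · rw [if_pos hc, if_pos hc, h j (by omega) (by omega), h (j+p) (by omega) (by omega)]
  · rw [if_neg hc, if_neg hc, h (j-p) (by omega) (by omega), h j (by omega) (by omega)]

def pvRead (A : List Int) : Nat → pvK := fun t => ((A.getD t 0 : Int) : pvK)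

lemma pv_mod_block (j s p2 : Nat) (_hp2 : 0 < p2) (h1 : s*p2 ≤ j) (h2 : j < s*p2 + p2) :
    j % p2 = j - s*p2 := by
  have e1 : p2*s = s*p2 := Nat.mul_comm p2 s
  have h3 : j = (j - s*p2) + p2*s := by omega
  rw [h3, Nat.add_mul_mod_self_left, Nat.mod_eq_of_lt (by omega)]
  omega

lemma pv_two_pow_succ (n : Nat) : (2:Nat)^(n+1) = 2*2^n := by
  rw [pow_succ]; ring

-- the F-stage of the port, pointwise in pvK
lemma pv_stageF_spec (h ph : Nat) (h1 : 1 ≤ ph) (h2 : ph ≤ h) (A : List Int) (hA : A.length = 2^h) :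
    (pvBflyStage h ph A).length = 2^h ∧ ∀ j, j < 2^h →
      pvRead (pvBflyStage h ph A) j = pvFm (2^(h-ph)) (pvRead A) j := by
  have hpp : (2:Nat)^(h-ph+1) = 2*2^(h-ph) := pv_two_pow_succ _
  have hp : 0 < (2:Nat)^(h-ph) := Nat.two_pow_pos _
  have hp2 : 0 < (2:Nat)^(h-ph+1) := Nat.two_pow_pos _
  have hw : 2^(ph-1) * 2^(h-ph+1) = 2^h := by
    rw [← pow_add]
    congr 1
    omega
  have hT : ∀ (now : Int) (s : Nat) (A' : List Int), s*2^(h-ph+1) + 2^(h-ph+1) ≤ A'.length →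
      (pvBflyInner (s*2^(h-ph+1)) (2^(h-ph)) now A').length = A'.length ∧ ∀ j : Nat,
        (pvBflyInner (s*2^(h-ph+1)) (2^(h-ph)) now A').getD j 0 =
          if s*2^(h-ph+1) ≤ j ∧ j < s*2^(h-ph+1) + 2^(h-ph+1)
          then pvPayF (2^(h-ph+1)) (2^(h-ph)) now (fun t => A'.getD t 0) j else A'.getD j 0 := by
    intro now s A' hlen'
    obtain ⟨L, G⟩ := pv_inner_spec (fun l r => PySem.Int.mod (l + r*now) pvMod)
      (fun l r => PySem.Int.mod (l - r*now) pvMod) (s*2^(h-ph+1)) (2^(h-ph)) A'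
      (by omega) (2^(h-ph)) le_rfl
    constructor
    · exact L
    · intro j
      have Gj := G j
      rw [show (pvBflyInner (s*2^(h-ph+1)) (2^(h-ph)) now A' : List Int)
          = (List.range (2^(h-ph))).foldl (fun B i =>
            (B.set (i+s*2^(h-ph+1)) ((fun l r => PySem.Int.mod (l + r*now) pvMod) (B.getD (i+s*2^(h-ph+1)) 0) (B.getD (i+s*2^(h-ph+1)+2^(h-ph)) 0))).set (i+s*2^(h-ph+1)+2^(h-ph))
              ((fun l r => PySem.Int.mod (l - r*now) pvMod) (B.getD (i+s*2^(h-ph+1)) 0) (B.getD (i+s*2^(h-ph+1)+2^(h-ph)) 0))) A' from rfl]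
      rw [Gj]
      by_cases hc1 : s*2^(h-ph+1) ≤ j ∧ j < s*2^(h-ph+1) + 2^(h-ph)
      · rw [if_pos hc1, if_pos (by omega)]
        unfold pvPayF
        rw [pv_mod_block j s (2^(h-ph+1)) hp2 (by omega) (by omega), if_pos (by omega)]
      · rw [if_neg hc1]
        by_cases hc2 : s*2^(h-ph+1) + 2^(h-ph) ≤ j ∧ j < s*2^(h-ph+1) + 2^(h-ph) + 2^(h-ph)
        · rw [if_pos hc2, if_pos (by omega)]
          unfold pvPayF
          rw [pv_mod_block j s (2^(h-ph+1)) hp2 (by omega) (by omega), if_neg (by omega)]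
        · rw [if_neg hc2, if_neg (by omega)]
  have hpay : ∀ (now : Int) (f g : Nat → Int) (j : Nat),
      (∀ t, (j/2^(h-ph+1))*2^(h-ph+1) ≤ t → t < (j/2^(h-ph+1))*2^(h-ph+1) + 2^(h-ph+1) → f t = g t) →
      pvPayF (2^(h-ph+1)) (2^(h-ph)) now f j = pvPayF (2^(h-ph+1)) (2^(h-ph)) now g j := by
    intro now f g j hfg
    rw [hpp] at hfg ⊢
    exact pvPayF_local (2^(h-ph)) hp now f g j hfg
  have H := pv_stagefold_spec (fun now off A => pvBflyInner off (2^(h-ph)) now A)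
    (pvPayF (2^(h-ph+1)) (2^(h-ph))) (2^(h-ph+1)) hp2 hT hpay
    (fun s x => PySem.Int.mod (x * pvSumE.getD (pvEIdx s) 0) pvMod) pvCseq pvCseq_succ
    (2^(ph-1)) A (by rw [hw, hA])
  obtain ⟨-, Hl, Hg⟩ := H
  constructor
  · show ((List.range (2^(ph-1))).foldl (fun st s =>
      (pvBflyInner (s * 2^(h-ph+1)) (2^(h-ph)) st.2 st.1,
       PySem.Int.mod (st.2 * pvSumE.getD (pvEIdx s) 0) pvMod)) (A, (1:Int))).1.length = 2^h
    rw [show ((A, (1:Int)) : List Int × Int) = (A, pvCseq 0) from rfl]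
    rw [Hl, hA]
  · intro j hj
    show pvRead ((List.range (2^(ph-1))).foldl (fun st s =>
      (pvBflyInner (s * 2^(h-ph+1)) (2^(h-ph)) st.2 st.1,
       PySem.Int.mod (st.2 * pvSumE.getD (pvEIdx s) 0) pvMod)) (A, (1:Int))).1 j = _
    unfold pvRead
    rw [show ((A, (1:Int)) : List Int × Int) = (A, pvCseq 0) from rfl]
    rw [Hg j, if_pos (by rw [hw]; exact hj)]
    unfold pvPayF pvFm
    rw [← hpp]
    by_cases hc : j % 2^(h-ph+1) < 2^(h-ph)
    · rw [if_pos hc, if_pos hc, pv_phi_mod]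
      push_cast
      unfold pvC
      ring
    · rw [if_neg hc, if_neg hc, pv_phi_mod]
      push_cast
      unfold pvC
      ring

-- the G-stage of the port, pointwise in pvK
lemma pv_stageG_spec (h ph : Nat) (h1 : 1 ≤ ph) (h2 : ph ≤ h) (A : List Int) (hA : A.length = 2^h) :
    (pvBflyInvStage h ph A).length = 2^h ∧ ∀ j, j < 2^h →
      pvRead (pvBflyInvStage h ph A) j = pvGm (2^(h-ph)) (pvRead A) j := by
  have hpp : (2:Nat)^(h-ph+1) = 2*2^(h-ph) := pv_two_pow_succ _
  have hp : 0 < (2:Nat)^(h-ph) := Nat.two_pow_pos _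
  have hp2 : 0 < (2:Nat)^(h-ph+1) := Nat.two_pow_pos _
  have hw : 2^(ph-1) * 2^(h-ph+1) = 2^h := by
    rw [← pow_add]
    congr 1
    omega
  have hT : ∀ (now : Int) (s : Nat) (A' : List Int), s*2^(h-ph+1) + 2^(h-ph+1) ≤ A'.length →
      (pvBflyInvInner (s*2^(h-ph+1)) (2^(h-ph)) now A').length = A'.length ∧ ∀ j : Nat,
        (pvBflyInvInner (s*2^(h-ph+1)) (2^(h-ph)) now A').getD j 0 =
          if s*2^(h-ph+1) ≤ j ∧ j < s*2^(h-ph+1) + 2^(h-ph+1)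
          then pvPayG (2^(h-ph+1)) (2^(h-ph)) now (fun t => A'.getD t 0) j else A'.getD j 0 := by
    intro now s A' hlen'
    obtain ⟨L, G⟩ := pv_inner_spec (fun l r => PySem.Int.mod (l + r) pvMod)
      (fun l r => PySem.Int.mod ((pvMod + l - r) * now) pvMod) (s*2^(h-ph+1)) (2^(h-ph)) A'
      (by omega) (2^(h-ph)) le_rfl
    constructor
    · exact L
    · intro j
      have Gj := G j
      rw [show (pvBflyInvInner (s*2^(h-ph+1)) (2^(h-ph)) now A' : List Int)
          = (List.range (2^(h-ph))).foldl (fun B i =>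
            (B.set (i+s*2^(h-ph+1)) ((fun l r => PySem.Int.mod (l + r) pvMod) (B.getD (i+s*2^(h-ph+1)) 0) (B.getD (i+s*2^(h-ph+1)+2^(h-ph)) 0))).set (i+s*2^(h-ph+1)+2^(h-ph))
              ((fun l r => PySem.Int.mod ((pvMod + l - r) * now) pvMod) (B.getD (i+s*2^(h-ph+1)) 0) (B.getD (i+s*2^(h-ph+1)+2^(h-ph)) 0))) A' from rfl]
      rw [Gj]
      by_cases hc1 : s*2^(h-ph+1) ≤ j ∧ j < s*2^(h-ph+1) + 2^(h-ph)
      · rw [if_pos hc1, if_pos (by omega)]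
        unfold pvPayG
        rw [pv_mod_block j s (2^(h-ph+1)) hp2 (by omega) (by omega), if_pos (by omega)]
      · rw [if_neg hc1]
        by_cases hc2 : s*2^(h-ph+1) + 2^(h-ph) ≤ j ∧ j < s*2^(h-ph+1) + 2^(h-ph) + 2^(h-ph)
        · rw [if_pos hc2, if_pos (by omega)]
          unfold pvPayG
          rw [pv_mod_block j s (2^(h-ph+1)) hp2 (by omega) (by omega), if_neg (by omega)]
        · rw [if_neg hc2, if_neg (by omega)]
  have hpay : ∀ (now : Int) (f g : Nat → Int) (j : Nat),
      (∀ t, (j/2^(h-ph+1))*2^(h-ph+1) ≤ t → t < (j/2^(h-ph+1))*2^(h-ph+1) + 2^(h-ph+1) → f t = g t) →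
      pvPayG (2^(h-ph+1)) (2^(h-ph)) now f j = pvPayG (2^(h-ph+1)) (2^(h-ph)) now g j := by
    intro now f g j hfg
    rw [hpp] at hfg ⊢
    exact pvPayG_local (2^(h-ph)) hp now f g j hfg
  have H := pv_stagefold_spec (fun now off A => pvBflyInvInner off (2^(h-ph)) now A)
    (pvPayG (2^(h-ph+1)) (2^(h-ph))) (2^(h-ph+1)) hp2 hT hpay
    (fun s x => PySem.Int.mod (x * pvSumIE.getD (pvEIdx s) 0) pvMod) pvDseq pvDseq_succ
    (2^(ph-1)) A (by rw [hw, hA])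
  obtain ⟨-, Hl, Hg⟩ := H
  constructor
  · show ((List.range (2^(ph-1))).foldl (fun st s =>
      (pvBflyInvInner (s * 2^(h-ph+1)) (2^(h-ph)) st.2 st.1,
       PySem.Int.mod (st.2 * pvSumIE.getD (pvEIdx s) 0) pvMod)) (A, (1:Int))).1.length = 2^h
    rw [show ((A, (1:Int)) : List Int × Int) = (A, pvDseq 0) from rfl]
    rw [Hl, hA]
  · intro j hj
    show pvRead ((List.range (2^(ph-1))).foldl (fun st s =>
      (pvBflyInvInner (s * 2^(h-ph+1)) (2^(h-ph)) st.2 st.1,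
       PySem.Int.mod (st.2 * pvSumIE.getD (pvEIdx s) 0) pvMod)) (A, (1:Int))).1 j = _
    unfold pvRead
    rw [show ((A, (1:Int)) : List Int × Int) = (A, pvDseq 0) from rfl]
    rw [Hg j, if_pos (by rw [hw]; exact hj)]
    unfold pvPayG pvGm
    rw [← hpp]
    by_cases hc : j % 2^(h-ph+1) < 2^(h-ph)
    · rw [if_pos hc, if_pos hc, pv_phi_mod]
      push_cast
      ring
    · rw [if_neg hc, if_neg hc, pv_phi_mod]
      push_cast
      unfold pvD
      have hPz : ((pvMod : Int) : pvK) = 0 := by decide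
      push_cast [hPz]
      ring

-- ---------- block index arithmetic ----------
lemma pv_div_block (j s p2 : Nat) (hp2 : 0 < p2) (h1 : s*p2 ≤ j) (h2 : j < s*p2 + p2) :
    j / p2 = s := by
  have e1 : p2*s = s*p2 := Nat.mul_comm p2 s
  have h3 : j = (j - s*p2) + p2*s := by omega
  rw [h3, Nat.add_mul_div_left _ _ hp2, Nat.div_eq_of_lt (by omega)]
  omega

lemma pv_blocks_le (q p2 z : Nat) (_hp2 : 0 < p2) (hdvd : p2 ∣ z) (h : q*p2 < z) :
    (q+1)*p2 ≤ z := by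
  obtain ⟨M, hM⟩ := hdvd
  subst hM
  have e1 : q*p2 = p2*q := Nat.mul_comm q p2
  have hqM : q < M := by
    by_contra hc
    have : p2*M ≤ p2*q := Nat.mul_le_mul_left p2 (by omega)
    omega
  calc (q+1)*p2 = p2*(q+1) := Nat.mul_comm _ _
    _ ≤ p2*M := Nat.mul_le_mul_left p2 (by omega)

-- ---------- congruence of the model maps below z ----------
lemma pvFm_congr (p z : Nat) (hp : 0 < p) (hdvd : 2*p ∣ z) (x y : Nat → pvK)
    (hxy : ∀ t, t < z → x t = y t) (j : Nat) (hj : j < z) :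
    pvFm p x j = pvFm p y j := by
  obtain ⟨hd, hm⟩ := pv_block_decomp j (2*p) (by omega)
  have hup : (j/(2*p)+1)*(2*p) ≤ z := pv_blocks_le (j/(2*p)) (2*p) z (by omega) hdvd (by omega)
  have he : (j/(2*p)+1)*(2*p) = (j/(2*p))*(2*p) + 2*p := by ring
  unfold pvFm
  by_cases hc : j % (2*p) < p
  · rw [if_pos hc, if_pos hc, hxy j hj, hxy (j+p) (by omega)]
  · rw [if_neg hc, if_neg hc, hxy (j-p) (by omega), hxy j hj]

lemma pvGm_congr (p z : Nat) (hp : 0 < p) (hdvd : 2*p ∣ z) (x y : Nat → pvK)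
    (hxy : ∀ t, t < z → x t = y t) (j : Nat) (hj : j < z) :
    pvGm p x j = pvGm p y j := by
  obtain ⟨hd, hm⟩ := pv_block_decomp j (2*p) (by omega)
  have hup : (j/(2*p)+1)*(2*p) ≤ z := pv_blocks_le (j/(2*p)) (2*p) z (by omega) hdvd (by omega)
  have he : (j/(2*p)+1)*(2*p) = (j/(2*p))*(2*p) + 2*p := by ring
  unfold pvGm
  by_cases hc : j % (2*p) < p
  · rw [if_pos hc, if_pos hc, hxy j hj, hxy (j+p) (by omega)]
  · rw [if_neg hc, if_neg hc, hxy (j-p) (by omega), hxy j hj]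

-- ---------- outer peel of the F-chain ----------
lemma pvFSeg_outer : ∀ (k m : Nat) (v : Nat → pvK),
    pvFSeg m (k+1) v = pvFm (2^m) (pvFSeg (m+1) k v) := by
  intro k
  induction k with
  | zero => intro m v; rfl
  | succ k ih =>
    intro m v
    show pvFSeg m (k+1) (pvFm (2^(m+(k+1))) v) = _
    rw [ih m (pvFm (2^(m+(k+1))) v)]
    congr 1
    show pvFSeg (m+1) k (pvFm (2^(m+(k+1))) v) = pvFSeg (m+1) (k+1) v
    have he : m+(k+1) = (m+1)+k := by omega
    rw [he]
    rfl

-- ---------- port butterfly = F-chain ----------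
lemma pv_butterfly_spec (h : Nat) (_h21 : h ≤ 21) (A : List Int) (hA : A.length = 2^h) :
    (pvButterfly A).length = 2^h ∧ ∀ j, j < 2^h →
      pvRead (pvButterfly A) j = pvFSeg 0 h (pvRead A) j := by
  have hbl : PySem.Int.bitLength ((A.length : Int) - 1) = h := by
    rw [hA]
    exact_mod_cast pv_bl_pow_sub_one h
  show ((pvButterfly A).length = 2^h ∧ _)
  unfold pvButterfly
  rw [hbl]
  suffices H : ∀ k, k ≤ h →
      ((List.range k).foldl (fun B ph' => pvBflyStage h (ph'+1) B) A).length = 2^h ∧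
      ∀ j, j < 2^h → pvRead ((List.range k).foldl (fun B ph' => pvBflyStage h (ph'+1) B) A) j
        = pvFSeg (h-k) k (pvRead A) j by
    obtain ⟨H1, H2⟩ := H h le_rfl
    refine ⟨H1, ?_⟩
    intro j hj
    rw [H2 j hj]
    have : h - h = 0 := by omega
    rw [this]
  intro k
  induction k with
  | zero =>
    intro _
    exact ⟨hA, fun j _ => rfl⟩
  | succ k ih =>
    intro hk
    obtain ⟨ih1, ih2⟩ := ih (by omega)
    rw [List.range_succ, List.foldl_append]
    set B := (List.range k).foldl (fun B ph' => pvBflyStage h (ph'+1) B) A with hB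
    simp only [List.foldl_cons, List.foldl_nil]
    obtain ⟨S1, S2⟩ := pv_stageF_spec h (k+1) (by omega) (by omega) B ih1
    refine ⟨S1, ?_⟩
    intro j hj
    rw [S2 j hj]
    have hpeel : pvFSeg (h-(k+1)) (k+1) (pvRead A)
        = pvFm (2^(h-(k+1))) (pvFSeg (h-(k+1)+1) k (pvRead A)) := pvFSeg_outer k _ _
    have he1 : h-(k+1)+1 = h-k := by omega
    have he2 : h-(k+1) = h-(k+1) := rfl
    rw [hpeel, he1]
    have he3 : (2:Nat)^(h-(k+1)) = 2^(h-(k+1)) := rfl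
    have hdvd : 2*2^(h-(k+1)) ∣ 2^h := by
      rw [show 2*2^(h-(k+1)) = 2^(h-(k+1)+1) from (pv_two_pow_succ _).symm]
      exact pow_dvd_pow 2 (by omega)
    exact pvFm_congr (2^(h-(k+1))) (2^h) (Nat.two_pow_pos _) hdvd
      _ _ (fun t ht => ih2 t ht) j hj

-- ---------- port inverse stages = G-chain, then the scale loop ----------
lemma pv_butterflyInv_spec (h : Nat) (h21 : h ≤ 21) (A : List Int) (hA : A.length = 2^h) :
    (pvButterflyInv A).length = 2^h ∧ ∀ j, j < 2^h →
      pvRead (pvButterflyInv A) j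
        = ((pvInvMod (((2:Nat)^h : Nat) : Int) : Int) : pvK) * pvGSeg 0 h (pvRead A) j
      ∧ 0 ≤ (pvButterflyInv A).getD j 0 ∧ (pvButterflyInv A).getD j 0 < pvMod := by
  have hbl : PySem.Int.bitLength ((A.length : Int) - 1) = h := by
    rw [hA]
    exact_mod_cast pv_bl_pow_sub_one h
  have hrw : pvButterflyInv A = (List.range (2^h)).foldl
      (fun B i => B.set i (PySem.Int.mod (B.getD i 0 * pvInvMod (((2:Nat)^h : Nat) : Int)) pvMod))
      ((List.range h).foldl (fun B ph' => pvBflyInvStage h (h-ph') B) A) := by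
    show (let n := A.length
          let h' := PySem.Int.bitLength ((n : Int) - 1)
          let B := (List.range h').foldl (fun B ph' => pvBflyInvStage h' (h'-ph') B) A
          let iz := pvInvMod (n : Int)
          (List.range n).foldl (fun B i => B.set i (PySem.Int.mod (B.getD i 0 * iz) pvMod)) B) = _
    simp only [hA, pv_bl_pow_sub_one]
  rw [hrw]
  suffices H : ∀ k, k ≤ h →
      ((List.range k).foldl (fun B ph' => pvBflyInvStage h (h-ph') B) A).length = 2^h ∧
      ∀ j, j < 2^h → pvRead ((List.range k).foldl (fun B ph' => pvBflyInvStage h (h-ph') B) A) j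
        = pvGSeg 0 k (pvRead A) j by
    obtain ⟨H1, H2⟩ := H h le_rfl
    set B := (List.range h).foldl (fun B ph' => pvBflyInvStage h (h-ph') B) A with hB
    obtain ⟨L1, L2⟩ := pv_setloop_spec
      (fun _ x => PySem.Int.mod (x * pvInvMod (((2:Nat)^h : Nat) : Int)) pvMod) B (2^h) (by omega)
    constructor
    · rw [L1, H1]
    · intro j hj
      refine ⟨?_, ?_⟩
      · show ((_ : List Int).getD j 0 : pvK) = _
        rw [L2 j, if_pos hj]
        rw [pv_phi_mod]
        push_cast
        rw [show (B.getD j 0 : pvK) = pvRead B j from rfl, H2 j hj]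
        ring
      · rw [L2 j, if_pos hj]
        exact pv_mod_bounds _
  intro k
  induction k with
  | zero =>
    intro _
    exact ⟨hA, fun j _ => rfl⟩
  | succ k ih =>
    intro hk
    obtain ⟨ih1, ih2⟩ := ih (by omega)
    rw [List.range_succ, List.foldl_append]
    set B := (List.range k).foldl (fun B ph' => pvBflyInvStage h (h-ph') B) A with hB
    simp only [List.foldl_cons, List.foldl_nil]
    obtain ⟨S1, S2⟩ := pv_stageG_spec h (h-k) (by omega) (by omega) B ih1
    refine ⟨S1, ?_⟩
    intro j hj
    rw [S2 j hj]
    have he1 : h-(h-k) = k := by omega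
    rw [he1]
    show pvGm (2^k) (pvRead B) j = pvGm (2^(0+k)) (pvGSeg 0 k (pvRead A)) j
    have he2 : (0:Nat)+k = k := by omega
    rw [he2]
    have hdvd : 2*2^k ∣ 2^h := by
      rw [show 2*2^k = 2^(k+1) from (pv_two_pow_succ _).symm]
      exact pow_dvd_pow 2 (by omega)
    exact pvGm_congr (2^k) (2^h) (Nat.two_pow_pos _) hdvd
      _ _ (fun t ht => ih2 t ht) j hj

-- ---------- model mathematics ----------
lemma pv_sum_even_odd (N : Nat) (f : Nat → pvK) :
    ∑ T ∈ Finset.range (2*N), f T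
      = ∑ t ∈ Finset.range N, f (2*t) + ∑ t ∈ Finset.range N, f (2*t+1) := by
  induction N with
  | zero => simp
  | succ N ih =>
    have h2 : 2*(N+1) = (2*N+1)+1 := by omega
    rw [h2, Finset.sum_range_succ, Finset.sum_range_succ, ih,
        Finset.sum_range_succ, Finset.sum_range_succ]
    ring

lemma pvU_zero : pvU 0 = 1 := by decide

lemma pvFSeg_eval : ∀ k : Nat, k ≤ 21 → ∀ (m : Nat) (v : Nat → pvK) (b i : Nat),
    b < 2^k → i < 2^m →
    pvFSeg m k v (b * 2^m + i) = ∑ t ∈ Finset.range (2^k), v (t * 2^m + i) * (pvU b)^t := by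
  intro k
  induction k with
  | zero =>
    intro _ m v b i hb hi
    have hb0 : b = 0 := by omega
    subst hb0
    simp [pvFSeg, pvU_zero]
  | succ k ih =>
    intro hk m v b i hb hi
    rw [pvFSeg_outer]
    set W := pvFSeg (m+1) k v with hW
    have hmpos : 0 < (2:Nat)^m := Nat.two_pow_pos m
    have hm1 : (2:Nat)^(m+1) = 2*2^m := pv_two_pow_succ m
    have hsplit : (2:Nat)^(k+1) = 2*2^k := pv_two_pow_succ k
    obtain ⟨b', hb'e⟩ : ∃ b', b = 2*b' ∨ b = 2*b'+1 := ⟨b/2, by omega⟩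
    have hb2 : b' < 2^k := by rw [hsplit] at hb; omega
    have hb20 : b' < 2^20 := lt_of_lt_of_le hb2 (Nat.pow_le_pow_right (by norm_num) (by omega))
    have e1 : W (b' * (2*2^m) + i) = ∑ t ∈ Finset.range (2^k), v (t * (2*2^m) + i) * (pvU b')^t := by
      have hthis := ih (by omega) (m+1) v b' i hb2 (by rw [hm1]; omega)
      rw [hm1] at hthis
      exact hthis
    have e2 : W (b' * (2*2^m) + (2^m + i)) = ∑ t ∈ Finset.range (2^k), v (t * (2*2^m) + (2^m + i)) * (pvU b')^t := by
      have hthis := ih (by omega) (m+1) v b' (2^m + i) hb2 (by rw [hm1]; omega)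
      rw [hm1] at hthis
      exact hthis
    have hpe_even : pvU (2*b') * pvU (2*b') = pvU b' := by
      rw [pvU_even b' hb20]
      rfl
    have hpe_odd : pvU (2*b'+1) * pvU (2*b'+1) = pvU b' := by
      rw [pvU_odd b' hb20]
      show (-pvC b') * (-pvC b') = pvU b'
      unfold pvU
      ring
    rcases hb'e with hbb | hbb
    · -- even block index
      have hj : b * 2^m + i = b' * (2*2^m) + i := by rw [hbb]; ring
      rw [hj]
      have hdivb : (b' * (2*2^m) + i) / (2*2^m) = b' :=
        pv_div_block _ b' _ (by omega) (by omega) (by omega)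
      have hmodb : (b' * (2*2^m) + i) % (2*2^m) = i := by
        have hmb := pv_mod_block (b' * (2*2^m) + i) b' (2*2^m) (by omega) (by omega) (by omega)
        omega
      show pvFm (2^m) W (b' * (2*2^m) + i) = _
      unfold pvFm
      rw [hdivb, hmodb, if_pos (by omega)]
      have hj2 : b' * (2*2^m) + i + 2^m = b' * (2*2^m) + (2^m + i) := by omega
      rw [hj2, e1, e2, hbb, hsplit, pv_sum_even_odd]
      have hS1 : ∑ t ∈ Finset.range (2^k), v ((2*t)*2^m + i) * (pvU (2*b'))^(2*t)
               = ∑ t ∈ Finset.range (2^k), v (t*(2*2^m) + i) * (pvU b')^t := by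
        apply Finset.sum_congr rfl
        intro t _
        have h1 : (2*t)*2^m + i = t*(2*2^m) + i := by ring
        rw [h1, pow_mul, pow_two, hpe_even]
      have hS2 : ∑ t ∈ Finset.range (2^k), v ((2*t+1)*2^m + i) * (pvU (2*b'))^(2*t+1)
               = (∑ t ∈ Finset.range (2^k), v (t*(2*2^m) + (2^m+i)) * (pvU b')^t) * pvC b' := by
        rw [Finset.sum_mul]
        apply Finset.sum_congr rfl
        intro t _
        have h1 : (2*t+1)*2^m + i = t*(2*2^m) + (2^m + i) := by ring
        have h2 : (pvU (2*b'))^(2*t+1) = (pvU b')^t * pvC b' := by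
          rw [pow_succ, pow_mul, pow_two, hpe_even, pvU_even b' hb20]
        rw [h1, h2]
        ring
      rw [hS1, hS2]
    · -- odd block index
      have hj : b * 2^m + i = b' * (2*2^m) + (2^m + i) := by rw [hbb]; ring
      rw [hj]
      have hdivb : (b' * (2*2^m) + (2^m + i)) / (2*2^m) = b' :=
        pv_div_block _ b' _ (by omega) (by omega) (by omega)
      have hmodb : (b' * (2*2^m) + (2^m + i)) % (2*2^m) = 2^m + i := by
        have hmb := pv_mod_block (b' * (2*2^m) + (2^m + i)) b' (2*2^m) (by omega) (by omega) (by omega)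
        omega
      show pvFm (2^m) W (b' * (2*2^m) + (2^m + i)) = _
      unfold pvFm
      rw [hdivb, hmodb, if_neg (by omega)]
      have hj2 : b' * (2*2^m) + (2^m + i) - 2^m = b' * (2*2^m) + i := by omega
      rw [hj2, e1, e2, hbb, hsplit, pv_sum_even_odd]
      have hS1 : ∑ t ∈ Finset.range (2^k), v ((2*t)*2^m + i) * (pvU (2*b'+1))^(2*t)
               = ∑ t ∈ Finset.range (2^k), v (t*(2*2^m) + i) * (pvU b')^t := by
        apply Finset.sum_congr rfl
        intro t _
        have h1 : (2*t)*2^m + i = t*(2*2^m) + i := by ring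
        rw [h1, pow_mul, pow_two, hpe_odd]
      have hS2 : ∑ t ∈ Finset.range (2^k), v ((2*t+1)*2^m + i) * (pvU (2*b'+1))^(2*t+1)
               = -((∑ t ∈ Finset.range (2^k), v (t*(2*2^m) + (2^m+i)) * (pvU b')^t) * pvC b') := by
        rw [Finset.sum_mul, ← Finset.sum_neg_distrib]
        apply Finset.sum_congr rfl
        intro t _
        have h1 : (2*t+1)*2^m + i = t*(2*2^m) + (2^m + i) := by ring
        have h2 : (pvU (2*b'+1))^(2*t+1) = (pvU b')^t * (-pvC b') := by
          rw [pow_succ, pow_mul, pow_two, hpe_odd, pvU_odd b' hb20]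
        rw [h1, h2]
        ring
      rw [hS1, hS2]
      ring

lemma pvGm_smul (p : Nat) (a : pvK) (v : Nat → pvK) (j : Nat) :
    pvGm p (fun t => a * v t) j = a * pvGm p v j := by
  unfold pvGm
  split_ifs <;> ring

lemma pvGF_point (p : Nat) (hp : 0 < p) (v : Nat → pvK) (j : Nat)
    (hcd : pvC (j/(2*p)) * pvD (j/(2*p)) = 1) :
    pvGm p (pvFm p v) j = 2 * v j := by
  obtain ⟨hd, hm⟩ := pv_block_decomp j (2*p) (by omega)
  set q := j/(2*p) with hq
  set r := j % (2*p) with hr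
  unfold pvGm
  by_cases hc : r < p
  · rw [if_pos (by omega)]
    have hjp_div : (j+p)/(2*p) = q := pv_div_block _ q _ (by omega) (by omega) (by omega)
    have hjp_mod : (j+p) % (2*p) = r + p := by
      have := pv_mod_block (j+p) q (2*p) (by omega) (by omega) (by omega)
      omega
    have hF1 : pvFm p v j = v j + v (j+p) * pvC q := by
      unfold pvFm
      rw [← hr, ← hq, if_pos hc]
    have hF2 : pvFm p v (j+p) = v j - v (j+p) * pvC q := by
      unfold pvFm
      rw [hjp_div, hjp_mod, if_neg (by omega)]
      congr 2
      omega
    rw [hF1, hF2]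
    ring
  · rw [if_neg (by omega)]
    have hjm_div : (j-p)/(2*p) = q := pv_div_block _ q _ (by omega) (by omega) (by omega)
    have hjm_mod : (j-p) % (2*p) = r - p := by
      have := pv_mod_block (j-p) q (2*p) (by omega) (by omega) (by omega)
      omega
    have hF1 : pvFm p v (j-p) = v (j-p) + v j * pvC q := by
      unfold pvFm
      rw [hjm_div, hjm_mod, if_pos (by omega)]
      congr 3
      omega
    have hF2 : pvFm p v j = v (j-p) - v j * pvC q := by
      unfold pvFm
      rw [← hr, ← hq, if_neg (by omega)]
    rw [hF1, hF2]
    have : v (j-p) + v j * pvC q - (v (j-p) - v j * pvC q) = 2 * v j * pvC q := by ring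
    rw [this]
    calc 2 * v j * pvC q * pvD q = 2 * v j * (pvC q * pvD q) := by ring
      _ = 2 * v j := by rw [hcd]; ring

lemma pvGF_chain : ∀ k : Nat, k ≤ 21 → ∀ z : Nat, z ≤ 2^21 → 2^k ∣ z →
    ∀ (v : Nat → pvK) (j : Nat), j < z →
    pvGSeg 0 k (pvFSeg 0 k v) j = (2:pvK)^k * v j := by
  intro k
  induction k with
  | zero =>
    intro _ z _ _ v j _
    show v j = 1 * v j
    rw [one_mul]
  | succ k ih =>
    intro hk z hz hdvd v j hj
    show pvGm (2^(0+k)) (pvGSeg 0 k (pvFSeg 0 (k+1) v)) j = _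
    rw [Nat.zero_add]
    have hpeel : pvFSeg 0 (k+1) v = pvFSeg 0 k (pvFm (2^(0+k)) v) := rfl
    have hdvd' : 2*2^k ∣ z := by
      rw [show 2*2^k = 2^(k+1) from (pv_two_pow_succ _).symm]
      exact hdvd
    have hcong : ∀ t, t < z → pvGSeg 0 k (pvFSeg 0 (k+1) v) t = (2:pvK)^k * pvFm (2^k) v t := by
      intro t ht
      rw [hpeel, Nat.zero_add]
      exact ih (by omega) z hz (dvd_trans (pow_dvd_pow 2 (by omega)) hdvd) (pvFm (2^k) v) t ht
    rw [pvGm_congr (2^k) z (Nat.two_pow_pos _) hdvd' _ (fun t => (2:pvK)^k * pvFm (2^k) v t) hcong j hj]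
    rw [pvGm_smul]
    have hcd : pvC (j/(2*2^k)) * pvD (j/(2*2^k)) = 1 := by
      apply pvCD
      have h1 : j / (2*2^k) ≤ j / 2 := by
        apply Nat.div_le_div_left
        · omega
        · omega
      omega
    rw [pvGF_point (2^k) (Nat.two_pow_pos _) v j hcd]
    rw [pow_succ]
    ring

-- ---------- convolution layer ----------
def pvCV (a : Nat → pvK) (n k : Nat) : pvK :=
  ∑ i ∈ Finset.range n, ∑ l ∈ Finset.range n, (if i+l = k then a i * a l else 0)

def pvCyc (z : Nat) (w : Nat → pvK) : Nat → pvK := fun j =>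
  ∑ i ∈ Finset.range z, ∑ l ∈ Finset.range z, (if (i+l) % z = j then w i * w l else 0)

lemma pv_pow_mod (z : Nat) (u : pvK) (hu : u^z = 1) (N : Nat) : u^(N % z) = u^N := by
  conv_rhs => rw [← Nat.div_add_mod N z]
  rw [pow_add, pow_mul, hu, one_pow, one_mul]

lemma pv_conv_eval (z : Nat) (hz : 0 < z) (u : pvK) (hu : u^z = 1) (w : Nat → pvK) :
    ∑ t ∈ Finset.range z, pvCyc z w t * u^t
      = (∑ t ∈ Finset.range z, w t * u^t) * (∑ t ∈ Finset.range z, w t * u^t) := by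
  rw [Finset.sum_mul_sum]
  unfold pvCyc
  simp only [Finset.sum_mul]
  rw [Finset.sum_comm]
  apply Finset.sum_congr rfl
  intro i _
  rw [Finset.sum_comm]
  apply Finset.sum_congr rfl
  intro l _
  have hstep : ∑ t ∈ Finset.range z, (if (i+l) % z = t then w i * w l else 0) * u^t
      = ∑ t ∈ Finset.range z, (if (i+l) % z = t then w i * w l * u^t else 0) := by
    apply Finset.sum_congr rfl
    intro t _
    split_ifs <;> ring
  rw [hstep, Finset.sum_ite_eq]
  rw [if_pos (Finset.mem_range.mpr (Nat.mod_lt _ hz))]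
  rw [pv_pow_mod z u hu]
  rw [pow_add]
  ring

lemma pvCV_collapse (a : Nat → pvK) (n k : Nat) :
    pvCV a n k = ∑ i ∈ Finset.range n, (if i ≤ k ∧ k - i < n then a i * a (k-i) else 0) := by
  unfold pvCV
  apply Finset.sum_congr rfl
  intro i _
  by_cases hc : i ≤ k ∧ k - i < n
  · rw [if_pos hc]
    rw [Finset.sum_eq_single (k-i)]
    · rw [if_pos (by omega)]
    · intro l _ hl
      rw [if_neg (by omega)]
    · intro habs
      exact absurd (Finset.mem_range.mpr hc.2) habs
  · rw [if_neg hc]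
    apply Finset.sum_eq_zero
    intro l hl
    rw [Finset.mem_range] at hl
    rw [if_neg (by omega)]

lemma pv_cyc_eq_cv (z n : Nat) (hz1 : 2*n - 1 ≤ z) (hn : 0 < n) (w : Nat → pvK)
    (hw0 : ∀ t, n ≤ t → w t = 0) (k : Nat) (_hk : k < 2*n-1) :
    pvCyc z w k = pvCV w n k := by
  unfold pvCyc pvCV
  have hnz : n ≤ z := by omega
  have houter : ∀ (F : Nat → pvK), (∀ i, n ≤ i → F i = 0) →
      ∑ i ∈ Finset.range z, F i = ∑ i ∈ Finset.range n, F i := by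
    intro F hF
    have hsub : Finset.range n ⊆ Finset.range z := by
      intro x hx
      rw [Finset.mem_range] at *
      omega
    refine (Finset.sum_subset hsub ?_).symm
    intro x hx hnx
    rw [Finset.mem_range] at hx
    rw [Finset.mem_range] at hnx
    exact hF x (by omega)
  rw [houter _ (by
    intro i hi
    apply Finset.sum_eq_zero
    intro l _
    rw [hw0 i hi]
    split_ifs <;> ring)]
  apply Finset.sum_congr rfl
  intro i hi
  rw [Finset.mem_range] at hi
  rw [houter _ (by
    intro l hl
    rw [hw0 l hl]
    split_ifs <;> ring)]
  apply Finset.sum_congr rfl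
  intro l hl
  rw [Finset.mem_range] at hl
  have hlt : i + l < z := by omega
  rw [Nat.mod_eq_of_lt hlt]

-- ---------- the concrete modular inverses of 2^h used by butterfly_inv ----------
lemma pv_iz (h : Nat) (h7 : 7 ≤ h) (h21 : h ≤ 21) :
    ((pvInvMod (((2:Nat)^h : Nat) : Int) : Int) : pvK) * (2:pvK)^h = 1 := by
  interval_cases h <;> decide

-- ---------- characterisation of B's port ----------
lemma pv_getD_replicate (m t : Nat) : (List.replicate m (0:Int)).getD t 0 = 0 := by
  unfold List.getD
  rw [List.getElem?_replicate]
  cases Nat.decLt t m with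
  | isTrue h => simp [h]
  | isFalse h => simp [h]

lemma pv_getD_take (xs : List Int) (m t : Nat) (h : t < m) : (xs.take m).getD t 0 = xs.getD t 0 := by
  unfold List.getD
  rw [List.getElem?_take_of_lt h]

lemma pv_getD_map_range (f : Nat → Int) (M t : Nat) (h : t < M) :
    (((List.range M).map f).getD t 0) = f t := by
  unfold List.getD
  rw [List.getElem?_map, List.getElem?_range h]
  rfl

lemma pv_cast_listsum (xs : List Int) : ((xs.sum : Int) : pvK) = (xs.map (fun x : Int => (x : pvK))).sum := by
  induction xs with
  | nil => simp
  | cons x xs ih =>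
    rw [List.sum_cons, List.map_cons, List.sum_cons, ← ih]
    push_cast
    ring

lemma pv_window_eq_cv (a : Nat → pvK) (n k : Nat) (hn : 0 < n) (_hk : k < 2*n-1) :
    ∑ t ∈ Finset.range (min k (n-1) + 1 - (k+1-n)), a ((k+1-n) + t) * a (k - ((k+1-n)+t))
      = pvCV a n k := by
  rw [pvCV_collapse]
  have hfilter : ∑ i ∈ Finset.range n, (if i ≤ k ∧ k - i < n then a i * a (k-i) else 0)
      = ∑ i ∈ Finset.Ico (k+1-n) (min k (n-1) + 1), a i * a (k-i) := by
    rw [← Finset.sum_filter]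
    apply Finset.sum_congr
    · ext i
      simp only [Finset.mem_filter, Finset.mem_range, Finset.mem_Ico]
      omega
    · intro i _
      rfl
  rw [hfilter, Finset.sum_Ico_eq_sum_range]

lemma pv_alt_spec (_A : List Int) (hn : 0 < _A.length) :
    (autocorrelation_alt _A).length = _A.length + _A.length - 1 ∧
    ∀ k, k < _A.length + _A.length - 1 →
      pvRead (autocorrelation_alt _A) k = pvCV (pvRead _A) _A.length k
      ∧ 0 ≤ (autocorrelation_alt _A).getD k 0 ∧ (autocorrelation_alt _A).getD k 0 < pvMod := by
  have hrw : autocorrelation_alt _A = (List.range (_A.length + _A.length - 1)).map (fun k =>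
      PySem.Int.mod (((List.range (min k (_A.length - 1) + 1 - (k + 1 - _A.length))).map (fun t =>
        _A.getD ((k + 1 - _A.length) + t) 0 * _A.getD (k - ((k + 1 - _A.length) + t)) 0)).sum) pvMod) := by
    unfold autocorrelation_alt
    rw [if_neg (by omega)]
  rw [hrw]
  constructor
  · rw [List.length_map, List.length_range]
  · intro k hk
    have hfk := pv_getD_map_range (fun k => PySem.Int.mod (((List.range (min k (_A.length - 1) + 1 - (k + 1 - _A.length))).map (fun t =>
        _A.getD ((k + 1 - _A.length) + t) 0 * _A.getD (k - ((k + 1 - _A.length) + t)) 0)).sum) pvMod)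
      (_A.length + _A.length - 1) k hk
    constructor
    · show ((_ : List Int).getD k 0 : pvK) = _
      rw [hfk, pv_phi_mod, pv_cast_listsum, List.map_map]
      have hsum : ((List.range (min k (_A.length - 1) + 1 - (k + 1 - _A.length))).map
          ((fun x : Int => (x : pvK)) ∘ (fun t =>
            _A.getD ((k + 1 - _A.length) + t) 0 * _A.getD (k - ((k + 1 - _A.length) + t)) 0))).sum
          = ∑ t ∈ Finset.range (min k (_A.length - 1) + 1 - (k + 1 - _A.length)),
              pvRead _A ((k + 1 - _A.length) + t) * pvRead _A (k - ((k + 1 - _A.length) + t)) := by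
        have hr : ∀ (M : Nat) (F : Nat → pvK), ((List.range M).map F).sum = ∑ t ∈ Finset.range M, F t := by
          intro M F
          rfl
        rw [← hr]
        apply congrArg
        apply List.map_congr_left
        intro t _
        show ((_A.getD ((k + 1 - _A.length) + t) 0 * _A.getD (k - ((k + 1 - _A.length) + t)) 0 : Int) : pvK) = _
        push_cast
        rfl
      rw [hsum, pv_window_eq_cv (pvRead _A) _A.length k hn (by omega)]
    · rw [hfk]
      exact pv_mod_bounds _

-- ---------- small-branch scatter loops ----------
lemma pv_scatter_inner (_A : List Int) (i : Nat) (res : List Int) : ∀ n : Nat, i + n ≤ res.length →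
    ((List.range n).foldl (fun r j =>
        r.set (i+j) (PySem.Int.mod (r.getD (i+j) 0 + _A.getD i 0 * _A.getD j 0) pvMod)) res).length = res.length ∧
    ∀ kk : Nat, ((List.range n).foldl (fun r j =>
        r.set (i+j) (PySem.Int.mod (r.getD (i+j) 0 + _A.getD i 0 * _A.getD j 0) pvMod)) res).getD kk 0 =
      if i ≤ kk ∧ kk < i+n
      then PySem.Int.mod (res.getD kk 0 + _A.getD i 0 * _A.getD (kk-i) 0) pvMod
      else res.getD kk 0 := by
  intro n
  induction n with
  | zero =>
    intro _
    constructor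
    · simp
    · intro kk
      simp only [List.range_zero, List.foldl_nil]
      rw [if_neg (by omega)]
  | succ n ih =>
    intro hlen
    obtain ⟨ihl, ihg⟩ := ih (by omega)
    rw [List.range_succ, List.foldl_append]
    set B := (List.range n).foldl (fun r j =>
        r.set (i+j) (PySem.Int.mod (r.getD (i+j) 0 + _A.getD i 0 * _A.getD j 0) pvMod)) res with hB
    simp only [List.foldl_cons, List.foldl_nil]
    have hBn : B.getD (i+n) 0 = res.getD (i+n) 0 := by
      rw [ihg, if_neg (by omega)]
    refine ⟨by rw [List.length_set, ihl], ?_⟩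
    intro kk
    rcases eq_or_ne kk (i+n) with hk | hk
    · subst hk
      rw [pv_getD_set_eq _ _ _ (by rw [ihl]; omega), hBn, if_pos (by omega)]
      have : i + n - i = n := by omega
      rw [this]
    · rw [pv_getD_set_ne _ _ _ _ (fun h => hk h.symm), ihg]
      by_cases h1 : i ≤ kk ∧ kk < i + n
      · rw [if_pos h1, if_pos (by omega)]
      · rw [if_neg h1, if_neg (by omega)]

lemma pv_scatter_outer (_A : List Int) (hn : 0 < _A.length) : ∀ m : Nat, m ≤ _A.length →
    ((List.range m).foldl (fun res i => (List.range _A.length).foldl (fun res j =>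
        res.set (i+j) (PySem.Int.mod (res.getD (i+j) 0 + _A.getD i 0 * _A.getD j 0) pvMod)) res)
      (List.replicate (_A.length + _A.length - 1) 0)).length = _A.length + _A.length - 1 ∧
    (∀ kk : Nat, 0 ≤ ((List.range m).foldl (fun res i => (List.range _A.length).foldl (fun res j =>
        res.set (i+j) (PySem.Int.mod (res.getD (i+j) 0 + _A.getD i 0 * _A.getD j 0) pvMod)) res)
      (List.replicate (_A.length + _A.length - 1) 0)).getD kk 0 ∧
      ((List.range m).foldl (fun res i => (List.range _A.length).foldl (fun res j =>
        res.set (i+j) (PySem.Int.mod (res.getD (i+j) 0 + _A.getD i 0 * _A.getD j 0) pvMod)) res)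
      (List.replicate (_A.length + _A.length - 1) 0)).getD kk 0 < pvMod) ∧
    ∀ kk : Nat, pvRead ((List.range m).foldl (fun res i => (List.range _A.length).foldl (fun res j =>
        res.set (i+j) (PySem.Int.mod (res.getD (i+j) 0 + _A.getD i 0 * _A.getD j 0) pvMod)) res)
      (List.replicate (_A.length + _A.length - 1) 0)) kk =
      ∑ i ∈ Finset.range m, (if i ≤ kk ∧ kk - i < _A.length
        then pvRead _A i * pvRead _A (kk-i) else 0) := by
  intro m
  induction m with
  | zero =>
    intro _
    refine ⟨by simp, ?_, ?_⟩
    · intro kk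
      simp only [List.range_zero, List.foldl_nil]
      rw [pv_getD_replicate]
      exact ⟨le_refl 0, by decide⟩
    · intro kk
      simp only [List.range_zero, List.foldl_nil]
      show ((List.replicate (_A.length + _A.length - 1) (0:Int)).getD kk 0 : pvK) = _
      rw [pv_getD_replicate, Finset.sum_range_zero]
      exact Int.cast_zero
  | succ m ih =>
    intro hm
    obtain ⟨ihl, ihb, ihg⟩ := ih (by omega)
    rw [List.range_succ, List.foldl_append]
    set B := (List.range m).foldl (fun res i => (List.range _A.length).foldl (fun res j =>
        res.set (i+j) (PySem.Int.mod (res.getD (i+j) 0 + _A.getD i 0 * _A.getD j 0) pvMod)) res)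
      (List.replicate (_A.length + _A.length - 1) 0) with hB
    simp only [List.foldl_cons, List.foldl_nil]
    obtain ⟨SL, SG⟩ := pv_scatter_inner _A m B _A.length (by rw [ihl]; omega)
    refine ⟨by rw [SL, ihl], ?_, ?_⟩
    · intro kk
      rw [SG kk]
      by_cases hc : m ≤ kk ∧ kk < m + _A.length
      · rw [if_pos hc]
        exact pv_mod_bounds _
      · rw [if_neg hc]
        exact ihb kk
    · intro kk
      show ((_ : List Int).getD kk 0 : pvK) = _
      rw [SG kk, Finset.sum_range_succ]
      by_cases hc : m ≤ kk ∧ kk < m + _A.length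
      · rw [if_pos hc, pv_phi_mod]
        push_cast
        rw [show ((B.getD kk 0 : Int) : pvK) = pvRead B kk from rfl, ihg kk]
        rw [if_pos (by omega)]
        rfl
      · rw [if_neg hc]
        rw [show ((B.getD kk 0 : Int) : pvK) = pvRead B kk from rfl, ihg kk]
        rw [if_neg (by omega)]
        ring

-- ---------- remaining glue ----------
lemma pvCV_congr (a b : Nat → pvK) (n k : Nat) (h : ∀ t, t < n → a t = b t) :
    pvCV a n k = pvCV b n k := by
  unfold pvCV
  apply Finset.sum_congr rfl
  intro i hi
  rw [Finset.mem_range] at hi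
  apply Finset.sum_congr rfl
  intro l hl
  rw [Finset.mem_range] at hl
  rw [h i hi, h l hl]

lemma pvGSeg_congr : ∀ (k z : Nat), 2^k ∣ z → ∀ (x y : Nat → pvK),
    (∀ t, t < z → x t = y t) → ∀ j, j < z → pvGSeg 0 k x j = pvGSeg 0 k y j := by
  intro k
  induction k with
  | zero => intro z _ x y hxy j hj; exact hxy j hj
  | succ k ih =>
    intro z hdvd x y hxy j hj
    show pvGm (2^(0+k)) (pvGSeg 0 k x) j = pvGm (2^(0+k)) (pvGSeg 0 k y) j
    rw [Nat.zero_add]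
    have hdvd' : 2*2^k ∣ z := by
      rw [show 2*2^k = 2^(k+1) from (pv_two_pow_succ _).symm]
      exact hdvd
    exact pvGm_congr (2^k) z (Nat.two_pow_pos _) hdvd' _ _
      (fun t ht => ih z (dvd_trans (pow_dvd_pow 2 (by omega)) hdvd) x y hxy t ht) j hj

lemma pv_list_eq (X Y : List Int) (hlen : X.length = Y.length)
    (hx : ∀ k, k < X.length → 0 ≤ X.getD k 0 ∧ X.getD k 0 < pvMod)
    (hy : ∀ k, k < X.length → 0 ≤ Y.getD k 0 ∧ Y.getD k 0 < pvMod)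
    (hphi : ∀ k, k < X.length → pvRead X k = pvRead Y k) : X = Y := by
  apply List.ext_getElem hlen
  intro i h1 h2
  have hgx : X.getD i 0 = X[i] := List.getD_eq_getElem X 0 h1
  have hgy : Y.getD i 0 = Y[i] := List.getD_eq_getElem Y 0 h2
  rw [← hgx, ← hgy]
  exact pv_int_eq_of_cast _ _ (hx i h1) (hy i h1) (hphi i h1)

-- branch form of port A (pure zeta-unfolding of the definition)
lemma pv_auto_eq (_A : List Int) : autocorrelation _A =
    (if _A.length = 0 then []
     else if _A.length ≤ 60 then
       (List.range _A.length).foldl (fun res i =>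
         (List.range _A.length).foldl (fun res j =>
           res.set (i+j) (PySem.Int.mod (res.getD (i+j) 0 + _A.getD i 0 * _A.getD j 0) pvMod)) res)
         (List.replicate (_A.length + _A.length - 1) 0)
     else
       (pvButterflyInv ((List.range (2 ^ (PySem.Int.bitLength ((_A.length : Int) + (_A.length : Int) - 2)))).foldl
           (fun A i => A.set i (PySem.Int.mod (A.getD i 0 * A.getD i 0) pvMod))
           (pvButterfly (_A ++ List.replicate (2 ^ (PySem.Int.bitLength ((_A.length : Int) + (_A.length : Int) - 2)) - _A.length) 0)))).take
         (_A.length + _A.length - 1)) := rfl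

theorem pv_main : ∀ (_A : List Int), _A.length ≤ 1048576 → autocorrelation _A = autocorrelation_alt _A := by
  intro _A hpre
  by_cases h0 : _A.length = 0
  · simp [autocorrelation, autocorrelation_alt, h0]
  · have hn : 0 < _A.length := by omega
    obtain ⟨BL, BG⟩ := pv_alt_spec _A hn
    by_cases h60 : _A.length ≤ 60
    · -- small branch: scatter loop = window sums
      rw [pv_auto_eq, if_neg h0, if_pos h60]
      obtain ⟨SL, SB, SG⟩ := pv_scatter_outer _A hn _A.length le_rfl
      apply pv_list_eq
      · rw [SL, BL]
      · intro k hk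
        exact SB k
      · intro k hk
        rw [SL] at hk
        exact (BG k hk).2
      · intro k hk
        rw [SL] at hk
        rw [SG k, (BG k hk).1, pvCV_collapse]
    · -- NTT branch
      have h61 : 61 ≤ _A.length := by omega
      rw [pv_auto_eq, if_neg h0, if_neg h60]
      have hcast : ((_A.length : Int) + (_A.length : Int) - 2) = ((2*_A.length - 2 : Nat) : Int) := by
        rw [Nat.cast_sub (by omega : 2 ≤ 2*_A.length)]
        push_cast
        ring
      rw [hcast]
      set n := _A.length with hn_def
      set H := PySem.Int.bitLength ((2*n - 2 : Nat) : Int) with hH_def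
      have h2n : 2*n - 2 < 2^H := pv_lt_pow_bl (2*n-2)
      have hH21 : H ≤ 21 := by
        apply pv_bl_le
        have h21 : (2:Nat)^21 = 2097152 := by norm_num
        omega
      have hH7 : 7 ≤ H := by
        by_contra hc
        have h6 : H ≤ 6 := by omega
        have hle : (2:Nat)^H ≤ 2^6 := Nat.pow_le_pow_right (by norm_num) h6
        have h64 : (2:Nat)^6 = 64 := by norm_num
        omega
      have hz21 : (2:Nat)^H ≤ 2^21 := Nat.pow_le_pow_right (by norm_num) hH21
      have hzn : n ≤ 2^H := by omega
      have hz2n : 2*n - 1 ≤ 2^H := by omega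
      set PD := _A ++ List.replicate (2^H - n) 0 with hPD
      have hPDlen : PD.length = 2^H := by
        rw [hPD, List.length_append, List.length_replicate]
        omega
      have hw_lt : ∀ t, t < n → pvRead PD t = pvRead _A t := by
        intro t ht
        unfold pvRead
        rw [hPD, List.getD_append _ _ _ _ (by rw [← hn_def] at *; omega)]
      have hw_ge : ∀ t, n ≤ t → pvRead PD t = 0 := by
        intro t ht
        unfold pvRead
        rw [hPD, List.getD_append_right _ _ _ _ (by rw [← hn_def] at *; omega), pv_getD_replicate]
        exact Int.cast_zero
      obtain ⟨BFl, BFg⟩ := pv_butterfly_spec H hH21 PD hPDlen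
      have SQspec := pv_setloop_spec (fun _ x => PySem.Int.mod (x * x) pvMod) (pvButterfly PD) (2^H) (by rw [BFl])
      set SQ := (List.range (2^H)).foldl (fun A i => A.set i (PySem.Int.mod (A.getD i 0 * A.getD i 0) pvMod)) (pvButterfly PD) with hSQ
      have hSQl : SQ.length = (pvButterfly PD).length := SQspec.1
      have hSQg : ∀ j : Nat, SQ.getD j 0 = if j < 2^H
          then PySem.Int.mod ((pvButterfly PD).getD j 0 * (pvButterfly PD).getD j 0) pvMod
          else (pvButterfly PD).getD j 0 := SQspec.2
      have hSQlen : SQ.length = 2^H := by rw [hSQl, BFl]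
      have heval : ∀ (v : Nat → pvK) (j : Nat), j < 2^H →
          pvFSeg 0 H v j = ∑ t ∈ Finset.range (2^H), v t * (pvU j)^t := by
        intro v j hj
        have he := pvFSeg_eval H hH21 0 v j 0 hj (by norm_num)
        simp only [pow_zero, Nat.mul_one, Nat.add_zero] at he
        exact he
      have hSQphi : ∀ j, j < 2^H → pvRead SQ j = pvFSeg 0 H (pvCyc (2^H) (pvRead PD)) j := by
        intro j hj
        show ((SQ.getD j 0 : Int) : pvK) = _
        rw [hSQg j, if_pos hj, pv_phi_mod]
        push_cast
        rw [show (((pvButterfly PD).getD j 0 : Int) : pvK) = pvRead (pvButterfly PD) j from rfl]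
        rw [BFg j hj, heval (pvRead PD) j hj, heval (pvCyc (2^H) (pvRead PD)) j hj]
        rw [pv_conv_eval (2^H) (Nat.two_pow_pos _) (pvU j) (pvU_pow H hH21 j hj) (pvRead PD)]
      obtain ⟨IVl, IVg⟩ := pv_butterflyInv_spec H hH21 SQ hSQlen
      apply pv_list_eq
      · rw [List.length_take, IVl, BL]
        omega
      · intro k hk
        rw [List.length_take, IVl] at hk
        have hkz : k < 2^H := by omega
        have hb := (IVg k hkz).2
        rw [pv_getD_take _ _ _ (by omega)]
        exact hb
      · intro k hk
        rw [List.length_take, IVl] at hk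
        have hk2 : k < n + n - 1 := by omega
        exact (BG k hk2).2
      · intro k hk
        rw [List.length_take, IVl] at hk
        have hk2 : k < n + n - 1 := by omega
        have hkz : k < 2^H := by omega
        have hφtake : pvRead ((pvButterflyInv SQ).take (n+n-1)) k = pvRead (pvButterflyInv SQ) k := by
          unfold pvRead
          rw [pv_getD_take _ _ _ (by omega)]
        rw [hφtake, (IVg k hkz).1]
        have hGS : pvGSeg 0 H (pvRead SQ) k = pvGSeg 0 H (pvFSeg 0 H (pvCyc (2^H) (pvRead PD))) k :=
          pvGSeg_congr H (2^H) dvd_rfl _ _ hSQphi k hkz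
        rw [hGS, pvGF_chain H hH21 (2^H) hz21 dvd_rfl (pvCyc (2^H) (pvRead PD)) k hkz]
        have hiz := pv_iz H hH7 hH21
        have hval : ((pvInvMod (((2:Nat)^H : Nat) : Int) : Int) : pvK) * ((2:pvK)^H * pvCyc (2^H) (pvRead PD) k)
            = pvCyc (2^H) (pvRead PD) k := by
          rw [← mul_assoc, hiz, one_mul]
        rw [hval]
        rw [pv_cyc_eq_cv (2^H) n hz2n hn (pvRead PD) hw_ge k (by omega)]
        rw [pvCV_congr (pvRead PD) (pvRead _A) n k hw_lt]
        exact ((BG k hk2).1).symm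

-- ===== VERDICT (by name: the statement is the Claim_ definition above) =====
theorem autocorrelation_spec : Claim_equal_autocorrelation := by
  intro A _ hpre
  unfold Spec_autocorrelation
  exact pv_main A hpre
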